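-- pv_equiv track=rewrite | github.com/ASSERT-KTH/Mokav | experiments/pynguin/c4b/return-lst/generated_tests/src_1487/4/src_1487.py | func
-- ===== SOURCE A (Python) =====
-- def func(*args):
-- 	ret_values = []
--
-- 	k = int(args[0])
-- 	r = 0
-- 	for i in range((k - 1)):
-- 	    r += (((k - i) * (i + 1)) - i)
-- 	ret_values.append((r + 1))
--
-- 	return ret_values
-- ===== SOURCE B (Python) =====
-- def func(*args):
--     k = int(args[0])
--     n = max(k - 1, 0)
--     r = (n * (6*k + 3*(k - 2)*(n - 1) - (n - 1)*(2*n - 1))) // 6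
--     return [r + 1]
-- ===== Notes on version B (the rewrite author's own statement) =====
-- stated objective: faster
-- what changed: Replaced the O(k) summation loop by a closed-form polynomial (the loop sums k + (k-2)i - i^2, whose partial sums have the standard cubic closed form), computed with one exact integer division.
import Mathlib
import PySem

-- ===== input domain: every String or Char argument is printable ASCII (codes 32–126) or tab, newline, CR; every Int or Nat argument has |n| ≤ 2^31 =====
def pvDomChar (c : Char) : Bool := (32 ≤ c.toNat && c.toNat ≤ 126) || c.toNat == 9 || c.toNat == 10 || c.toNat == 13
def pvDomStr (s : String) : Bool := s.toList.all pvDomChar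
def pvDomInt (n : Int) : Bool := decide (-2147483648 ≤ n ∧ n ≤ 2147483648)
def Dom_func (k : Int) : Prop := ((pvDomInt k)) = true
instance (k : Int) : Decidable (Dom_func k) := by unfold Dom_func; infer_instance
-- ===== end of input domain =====

-- B replaces A's O(k) summation loop by a closed-form polynomial with one exact integer division (O(1)).

-- ===== PORT A =====
def func (k : Int) : List Int :=
  let r := (PySem.List.pyRange 0 (k - 1) 1).foldl (fun r i => r + ((k - i) * (i + 1) - i)) 0
  [r + 1]

-- ===== PORT B =====
def func_alt (k : Int) : List Int :=
  let n := max (k - 1) 0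
  let r := PySem.Int.floordiv (n * (6*k + 3*(k - 2)*(n - 1) - (n - 1)*(2*n - 1))) 6
  [r + 1]

-- ===== PRECONDITION & SPEC =====
def Spec_func (k : Int) (out : List Int) : Prop := out = func_alt k
instance (k : Int) (out : List Int) : Decidable (Spec_func k out) := by unfold Spec_func; infer_instance

-- ===== CLAIM (what is proved, stated in full; the proofs are below) =====
def Claim_equal_func : Prop := ∀ (k : Int), Dom_func k → Spec_func k (func k)

-- ===== LEMMAS AND PROOFS =====

-- Six times A's loop sum over range(m) equals the cubic polynomial B divides by 6.
theorem six_mul_fold (k : Int) (m : Nat) :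
    6 * (PySem.List.pyRange 0 (m : Int) 1).foldl (fun r i => r + ((k - i) * (i + 1) - i)) 0
      = (m : Int) * (6*k + 3*(k - 2)*((m : Int) - 1) - ((m : Int) - 1)*(2*(m : Int) - 1)) := by
  induction m with
  | zero => simp
  | succ m ih =>
      have h : PySem.List.pyRange 0 ((m : Int) + 1) 1
          = PySem.List.pyRange 0 (m : Int) 1 ++ [(m : Int)] :=
        PySem.List.pyRange_one_succ_right (by positivity)
      push_cast
      rw [h, List.foldl_append]
      simp only [List.foldl_cons, List.foldl_nil]
      push_cast at ih
      linear_combination ih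

theorem func_eq (k : Int) : func k = func_alt k := by
  by_cases hk : k - 1 ≤ 0
  · have h0 : max (k - 1) 0 = 0 := by omega
    simp [func, func_alt, PySem.List.pyRange_one_eq_nil hk, h0, PySem.Int.floordiv]
  · have hm : ((k - 1).toNat : Int) = k - 1 := by omega
    have hmax : max (k - 1) 0 = k - 1 := by omega
    have h6 := six_mul_fold k (k - 1).toNat
    rw [hm] at h6
    simp only [func, func_alt, hmax, ← h6]
    rw [PySem.Int.floordiv_eq_ediv_of_pos (by norm_num),
        Int.mul_ediv_cancel_left _ (by norm_num : (6:Int) ≠ 0)]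

-- ===== VERDICT (by name: the statement is the Claim_ definition above) =====
theorem func_spec : Claim_equal_func := by
  intro k _
  unfold Spec_func
  exact func_eq k
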